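-- pv_equiv track=rewrite | github.com/proozack/price | price/modules/tager/parsers.py | neighborhood_analysis
-- ===== SOURCE A (Python) =====
-- def neighborhood_analysis(text: str, entities: list) -> list:
--     found_keys = []
--     last_key = None
--     for entiti in entities:
--         for word in text.split(' '):
--             new_str = "{}{}".format(last_key, word)
--             if new_str == entiti[1]:
--                 found_keys.append(
--                     (
--                         entiti[0],
--                         entiti[1],
--                     )
--                 )
--             last_key = word
--     return found_keys
-- ===== SOURCE B (Python) =====
-- def neighborhood_analysis(text: str, entities: list) -> list:
--     words = text.split(' ')
--     counts = {}
--     for a, b in zip(words, words[1:]):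
--         counts[a + b] = counts.get(a + b, 0) + 1
--     return [(k, v) for k, v in entities for _ in range(counts.get(v, 0))]
-- ===== Notes on version B (the rewrite author's own statement) =====
-- stated objective: faster
-- what changed: B splits the text once, builds a dict counting adjacent-word concatenations in one pass, and emits each entity's tuple once per count via a lookup, instead of A's per-entity rescan of all words.
-- intended difference: On inputs where the first entity's value equals 'None'+first word, or a later entity's value equals last word+first word, A returns extra tuples from its uninitialised/carried-over last_key ('None' at the very first comparison, the previous entity's final word afterwards); B returns only genuine adjacent-word matches, which is the intended behaviour. — e.g. on neighborhood_analysis("x y", [("k", "Nonex")]): A returns [("k", "Nonex")], B returns []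
import Mathlib
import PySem

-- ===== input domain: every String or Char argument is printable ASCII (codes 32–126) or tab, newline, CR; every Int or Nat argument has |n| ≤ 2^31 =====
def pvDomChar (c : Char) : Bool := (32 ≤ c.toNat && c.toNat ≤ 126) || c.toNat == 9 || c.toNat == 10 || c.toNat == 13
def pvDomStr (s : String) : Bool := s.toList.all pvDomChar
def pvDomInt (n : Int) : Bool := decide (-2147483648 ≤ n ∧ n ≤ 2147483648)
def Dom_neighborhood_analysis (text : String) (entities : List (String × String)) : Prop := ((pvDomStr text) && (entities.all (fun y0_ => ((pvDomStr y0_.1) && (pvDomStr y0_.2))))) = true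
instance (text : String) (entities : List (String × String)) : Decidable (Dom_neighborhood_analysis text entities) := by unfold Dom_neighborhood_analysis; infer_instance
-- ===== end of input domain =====

-- B counts adjacent-word concatenations in one dict pass and looks each entity up (A rescans all words per entity); on the D_ boundary inputs B drops A's phantom matches.

-- ===== PORT A =====
-- last_key starts as None; "{}{}".format(last_key, word) stringifies it, so the
-- state carries the List Char image of str(last_key), initially "None".
def neighborhood_analysis (text : String) (entities : List (String × String)) : List (String × String) :=
  (entities.foldl
    (fun st e =>
      (PySem.Chars.splitOn text.toList [' ']).foldl
        (fun st2 w =>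
          (if st2.2 ++ w = e.2.toList then st2.1 ++ [(e.1, e.2)] else st2.1, w))
        st)
    (([] : List (String × String)), "None".toList)).1

-- ===== PORT B =====
def neighborhood_analysis_alt (text : String) (entities : List (String × String)) : List (String × String) :=
  let ws := PySem.Chars.splitOn text.toList [' ']
  let counts := (ws.zip ws.tail).foldl
    (fun d p => d.insert (p.1 ++ p.2) (d.getD (p.1 ++ p.2) 0 + 1))
    (PySem.Dict.empty : PySem.Dict (List Char) Int)
  entities.flatMap (fun e => List.replicate (counts.getD e.2.toList 0).toNat (e.1, e.2))

-- ===== PRECONDITION & SPEC =====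
-- On inputs where the first entity's value equals "None"+first word, or a later entity's
-- value equals last word+first word, A returns extra tuples from its uninitialised /
-- carried-over last_key; B returns only genuine adjacent-word matches, the intended value.
def D_neighborhood_analysis (text : String) (entities : List (String × String)) : Prop :=
  (entities ≠ [] ∧ (entities.headD ("", "")).2.toList
      = "None".toList ++ (PySem.Chars.splitOn text.toList [' ']).headD [])
  ∨ (∃ e ∈ entities.tail, e.2.toList
      = (PySem.Chars.splitOn text.toList [' ']).getLastD []
        ++ (PySem.Chars.splitOn text.toList [' ']).headD [])
instance (text : String) (entities : List (String × String)) : Decidable (D_neighborhood_analysis text entities) := by unfold D_neighborhood_analysis; infer_instance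

def Spec_neighborhood_analysis (text : String) (entities : List (String × String)) (out : List (String × String)) : Prop := ¬ D_neighborhood_analysis text entities → out = neighborhood_analysis_alt text entities
instance (text : String) (entities : List (String × String)) (out : List (String × String)) : Decidable (Spec_neighborhood_analysis text entities out) := by unfold Spec_neighborhood_analysis; infer_instance

def pvDiffWitness_neighborhood_analysis : String × (List (String × String)) := ("x y", [("k", "Nonex")])
def pvDiffWitnessOut_neighborhood_analysis : (List (String × String)) × (List (String × String)) := ([("k", "Nonex")], [])

-- ===== CLAIM (what is proved, stated in full; the proofs are below) =====
def Claim_unchanged_neighborhood_analysis : Prop := ∀ (text : String) (entities : List (String × String)), Dom_neighborhood_analysis text entities → Spec_neighborhood_analysis text entities (neighborhood_analysis text entities)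
def Claim_changed_neighborhood_analysis : Prop := Dom_neighborhood_analysis (pvDiffWitness_neighborhood_analysis.1) (pvDiffWitness_neighborhood_analysis.2) ∧ D_neighborhood_analysis (pvDiffWitness_neighborhood_analysis.1) (pvDiffWitness_neighborhood_analysis.2) ∧ neighborhood_analysis (pvDiffWitness_neighborhood_analysis.1) (pvDiffWitness_neighborhood_analysis.2) = pvDiffWitnessOut_neighborhood_analysis.1 ∧ neighborhood_analysis_alt (pvDiffWitness_neighborhood_analysis.1) (pvDiffWitness_neighborhood_analysis.2) = pvDiffWitnessOut_neighborhood_analysis.2 ∧ pvDiffWitnessOut_neighborhood_analysis.1 ≠ pvDiffWitnessOut_neighborhood_analysis.2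
def Claim_exact_neighborhood_analysis : Prop := ∀ (text : String) (entities : List (String × String)), Dom_neighborhood_analysis text entities → D_neighborhood_analysis text entities → neighborhood_analysis text entities ≠ neighborhood_analysis_alt text entities

-- ===== LEMMAS AND PROOFS =====

-- number of matches of v during one inner pass of A, entering with last_key lk
def pvMC (v lk : List Char) (ws : List (List Char)) : Nat :=
  match ws with
  | [] => 0
  | w :: t => (if lk ++ w = v then 1 else 0) + pvMC v w t

-- the adjacent-pair concatenations of ws
def pvPairs (ws : List (List Char)) : List (List Char) :=
  (ws.zip ws.tail).map (fun p => p.1 ++ p.2)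

-- per-entity output block, with boundary concatenation b
def pvEnt (ws : List (List Char)) (b : List Char) (e : String × String) : List (String × String) :=
  List.replicate ((pvPairs ws).count e.2.toList + (if e.2.toList = b then 1 else 0)) (e.1, e.2)

-- A's normal form: head entity sees boundary `first`, the rest see `wrap`
def pvBuild (ws : List (List Char)) (first wrap : List Char) (es : List (String × String)) :
    List (String × String) :=
  match es with
  | [] => []
  | e :: t => pvEnt ws first e ++ (t.map (pvEnt ws wrap)).flatten

-- B's normal form: pure pair counts
def pvB (ws : List (List Char)) (es : List (String × String)) : List (String × String) :=
  es.flatMap (fun e => List.replicate ((pvPairs ws).count e.2.toList) (e.1, e.2))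

theorem pvMC_nil (v lk : List Char) : pvMC v lk [] = 0 := rfl

theorem pvMC_cons (v lk w : List Char) (t : List (List Char)) :
    pvMC v lk (w :: t) = (if lk ++ w = v then 1 else 0) + pvMC v w t := rfl

theorem pv_splitOn_go_ne (sep : List Char) (fuel : Nat) (s cur : List Char)
    (acc : List (List Char)) : PySem.Chars.splitOn.go sep fuel s cur acc ≠ [] := by
  induction fuel generalizing s cur acc with
  | zero => simp [PySem.Chars.splitOn.go]
  | succ n ih =>
    cases s with
    | nil => simp [PySem.Chars.splitOn.go]
    | cons c rest =>
      rw [PySem.Chars.splitOn.go]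
      split_ifs <;> apply ih

theorem pv_splitOn_ne (s sep : List Char) : PySem.Chars.splitOn s sep ≠ [] := by
  unfold PySem.Chars.splitOn; apply pv_splitOn_go_ne

theorem pv_getLastD_cons {α : Type} (w : α) (t : List α) (d : α) (h : t ≠ []) :
    (w :: t).getLastD d = t.getLastD d := by
  cases t with
  | nil => exact absurd rfl h
  | cons a l => rfl

-- A's inner loop over the words, entering with last_key lk
theorem pv_inner (e : String × String) :
    ∀ (ws : List (List Char)), ws ≠ [] → ∀ (lk : List Char) (acc : List (String × String)),
    ws.foldl
      (fun st2 w => (if st2.2 ++ w = e.2.toList then st2.1 ++ [(e.1, e.2)] else st2.1, w))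
      (acc, lk)
    = (acc ++ List.replicate (pvMC e.2.toList lk ws) (e.1, e.2), ws.getLastD []) := by
  intro ws
  induction ws with
  | nil => intro h; exact absurd rfl h
  | cons w t ih =>
    intro _ lk acc
    cases t with
    | nil =>
      simp only [List.foldl, pvMC_cons, pvMC_nil]
      split_ifs <;> simp
    | cons w' t' =>
      rw [List.foldl_cons]
      rw [ih (by simp) w (if lk ++ w = e.2.toList then acc ++ [(e.1, e.2)] else acc)]
      rw [pv_getLastD_cons w (w' :: t') [] (by simp),
        pvMC_cons e.2.toList lk w (w' :: t')]
      split_ifs <;> simp [List.replicate_add]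

theorem pv_mc_eq (v : List Char) :
    ∀ (ws : List (List Char)), ws ≠ [] → ∀ (lk : List Char),
    pvMC v lk ws = (pvPairs ws).count v + (if lk ++ ws.headD [] = v then 1 else 0) := by
  intro ws
  induction ws with
  | nil => intro h; exact absurd rfl h
  | cons w t ih =>
    intro _ lk
    cases t with
    | nil => simp [pvMC_cons, pvMC_nil, pvPairs]
    | cons w' t' =>
      have h := ih (by simp) w
      rw [pvMC_cons, h]
      simp only [pvPairs, List.zip_cons_cons, List.tail_cons, List.map_cons,
        List.count_cons, List.headD_cons] at *
      split_ifs <;> simp_all <;> omega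

theorem pvBuild_same (ws : List (List Char)) (b : List Char) (t : List (String × String)) :
    pvBuild ws b b t = (t.map (pvEnt ws b)).flatten := by
  cases t <;> simp [pvBuild]

-- A's outer loop
theorem pv_outerA (ws : List (List Char)) (hws : ws ≠ []) :
    ∀ (es : List (String × String)) (acc : List (String × String)) (lk : List Char),
    (es.foldl
      (fun st e =>
        ws.foldl
          (fun st2 w => (if st2.2 ++ w = e.2.toList then st2.1 ++ [(e.1, e.2)] else st2.1, w))
          st)
      (acc, lk)).1
    = acc ++ pvBuild ws (lk ++ ws.headD []) (ws.getLastD [] ++ ws.headD []) es := by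
  intro es
  induction es with
  | nil => intro acc lk; simp [pvBuild]
  | cons e t ih =>
    intro acc lk
    simp only [List.foldl]
    rw [pv_inner e ws hws lk acc, ih, pvBuild_same]
    rw [pv_mc_eq e.2.toList ws hws lk]
    simp only [pvBuild, List.append_assoc]
    congr 2
    unfold pvEnt
    congr 1
    split_ifs with h1 h2 <;> simp_all [eq_comm]

-- B's counting dict returns the pair counts
theorem pv_counts (ws : List (List Char)) (v : List Char) :
    ((ws.zip ws.tail).foldl
      (fun d p => d.insert (p.1 ++ p.2) (d.getD (p.1 ++ p.2) 0 + 1))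
      (PySem.Dict.empty : PySem.Dict (List Char) Int)).getD v 0
    = ((pvPairs ws).count v : Int) := by
  have h : ((ws.zip ws.tail).foldl
      (fun d p => d.insert (p.1 ++ p.2) (d.getD (p.1 ++ p.2) 0 + 1))
      (PySem.Dict.empty : PySem.Dict (List Char) Int))
    = (pvPairs ws).foldl
      (fun d x => d.insert x (d.getD x 0 + 1))
      (PySem.Dict.empty : PySem.Dict (List Char) Int) := by
    rw [pvPairs, List.foldl_map]
  rw [h, PySem.Dict.getD_foldl_insert_add_one]
  simp [PySem.Dict.getD, PySem.Dict.empty, PySem.Dict.get?]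

-- B computes its normal form
theorem pv_altB (text : String) (entities : List (String × String)) :
    neighborhood_analysis_alt text entities
    = pvB (PySem.Chars.splitOn text.toList [' ']) entities := by
  unfold neighborhood_analysis_alt pvB
  simp only []
  congr 1
  funext e
  rw [pv_counts]
  simp

-- tail blocks collapse when no tail entity matches the wrap boundary
theorem pv_tail_eq (ws : List (List Char)) (wrap : List Char) :
    ∀ (t : List (String × String)), (∀ e ∈ t, e.2.toList ≠ wrap) →
    (t.map (pvEnt ws wrap)).flatten
      = t.flatMap (fun e => List.replicate ((pvPairs ws).count e.2.toList) (e.1, e.2)) := by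
  intro t
  induction t with
  | nil => intro _; simp
  | cons e' t' ih =>
    intro h
    simp only [List.map_cons, List.flatten_cons, List.flatMap_cons]
    rw [ih (fun x hx => h x (List.mem_cons_of_mem _ hx))]
    congr 1
    unfold pvEnt
    rw [if_neg (h e' (by simp))]
    simp

-- outside D_, A's normal form collapses to B's
theorem pv_build_eq_pvB (ws : List (List Char)) (first wrap : List Char)
    (es : List (String × String))
    (hhead : ∀ e, es.headD ("", "") = e → es ≠ [] → e.2.toList ≠ first)
    (htail : ∀ e ∈ es.tail, e.2.toList ≠ wrap) :
    pvBuild ws first wrap es = pvB ws es := by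
  cases es with
  | nil => simp [pvBuild, pvB]
  | cons e t =>
    simp only [pvBuild, pvB, List.flatMap_cons]
    rw [pv_tail_eq ws wrap t htail]
    congr 1
    unfold pvEnt
    rw [if_neg (hhead e rfl (by simp))]
    simp

-- length of a tail block
theorem pv_tail_len (ws : List (List Char)) (wrap : List Char) :
    ∀ (t : List (String × String)),
    ((t.map (pvEnt ws wrap)).flatten).length
      = (t.flatMap (fun e => List.replicate ((pvPairs ws).count e.2.toList) (e.1, e.2))).length
        + (t.map (fun e' => if e'.2.toList = wrap then 1 else 0)).sum := by
  intro t
  induction t with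
  | nil => simp
  | cons e' t' ih =>
    simp only [List.map_cons, List.flatten_cons, List.flatMap_cons, List.length_append,
      List.sum_cons, ih, pvEnt, List.length_replicate]
    omega

-- lengths of the two normal forms (nonempty entity list)
theorem pv_len_build (ws : List (List Char)) (first wrap : List Char)
    (e : String × String) (t : List (String × String)) :
    (pvBuild ws first wrap (e :: t)).length
      = (pvB ws (e :: t)).length
        + ((if e.2.toList = first then 1 else 0)
            + (t.map (fun e' => if e'.2.toList = wrap then 1 else 0)).sum) := by
  simp only [pvBuild, pvB, List.flatMap_cons, List.length_append, pvEnt,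
    List.length_replicate, pv_tail_len]
  omega

-- ===== VERDICT (by name: the statement is the Claim_ definition above) =====
theorem neighborhood_analysis_spec : Claim_unchanged_neighborhood_analysis := by
  unfold Claim_unchanged_neighborhood_analysis Spec_neighborhood_analysis
  intro text entities _ hD
  unfold neighborhood_analysis
  rw [pv_outerA (PySem.Chars.splitOn text.toList [' ']) (pv_splitOn_ne _ _) entities []
      "None".toList]
  rw [pv_altB]
  rw [pv_build_eq_pvB]
  · simp
  · intro e he hne habs
    exact hD (Or.inl ⟨hne, by rw [he, habs]⟩)
  · intro e he habs
    exact hD (Or.inr ⟨e, he, habs⟩)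

theorem neighborhood_analysis_changed : Claim_changed_neighborhood_analysis := by
  unfold Claim_changed_neighborhood_analysis; decide

theorem neighborhood_analysis_tight : Claim_exact_neighborhood_analysis := by
  unfold Claim_exact_neighborhood_analysis
  intro text entities _ hD habs
  have hlen := congrArg List.length habs
  rw [show neighborhood_analysis text entities
      = pvBuild (PySem.Chars.splitOn text.toList [' '])
          ("None".toList ++ (PySem.Chars.splitOn text.toList [' ']).headD [])
          ((PySem.Chars.splitOn text.toList [' ']).getLastD []
            ++ (PySem.Chars.splitOn text.toList [' ']).headD [])
          entities from by
        unfold neighborhood_analysis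
        rw [pv_outerA (PySem.Chars.splitOn text.toList [' ']) (pv_splitOn_ne _ _) entities []
          "None".toList]
        simp] at hlen
  rw [pv_altB] at hlen
  unfold D_neighborhood_analysis at hD
  cases entities with
  | nil =>
    rcases hD with ⟨h, _⟩ | ⟨e, he, _⟩
    · exact h rfl
    · simp at he
  | cons e t =>
    rw [pv_len_build] at hlen
    simp only [List.headD_cons, List.tail_cons, ne_eq] at hD
    rcases hD with ⟨_, h⟩ | ⟨e', he', h⟩
    · rw [if_pos h] at hlen; omega
    · have hge : ((t.map (fun e'' => if e''.2.toList
          = (PySem.Chars.splitOn text.toList [' ']).getLastD []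
            ++ (PySem.Chars.splitOn text.toList [' ']).headD [] then 1 else 0)).sum) ≥ 1 := by
        have hm : (1 : Nat) ∈ t.map (fun e'' => if e''.2.toList
            = (PySem.Chars.splitOn text.toList [' ']).getLastD []
              ++ (PySem.Chars.splitOn text.toList [' ']).headD [] then 1 else 0) :=
          List.mem_map.mpr ⟨e', he', by rw [if_pos h]⟩
        exact List.single_le_sum (fun x _ => Nat.zero_le x) 1 hm
      omega
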